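-- pv_equiv track=rewrite | github.com/eedede/Five-in-a-Row | five_in_a_row/fields.py | calc_min_required_moves2
-- ===== SOURCE A (Python) =====
-- def calc_min_required_moves2( data, offset, pattern, anti_pattern):
--
-- 	count_min = 6
-- 	start_left = max( 0, offset - 4)
-- 	end_right = min( offset+4, len(data)-1)
--
-- 	frames = max(0, end_right - start_left - 3)
--
-- 	if frames > 0:
-- 		for w in range(frames):
-- 			missing_fields = 0
-- 			for u in data[start_left + w:start_left + w + 5]:
-- 				if u == anti_pattern:
-- 					missing_fields = 6
-- 					break
-- 				elif u == 0:
-- 					missing_fields +=1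
-- 			if missing_fields < count_min:
-- 				count_min = missing_fields
--
-- 	return count_min
-- ===== SOURCE B (Python) =====
-- def calc_min_required_moves2(data, offset, pattern, anti_pattern):
--     lo = max(0, offset - 4)
--     hi = min(offset + 4, len(data) - 1)
--     if hi - lo < 4:
--         return 6  # no full 5-cell window near the offset
--     seg = data[lo:hi + 1]
--     # counts for the first 5-cell window (anti_pattern classified before 0)
--     anti = 0
--     zeros = 0
--     for u in seg[:5]:
--         if u == anti_pattern:
--             anti += 1
--         elif u == 0:
--             zeros += 1
--     best = 6 if anti else zeros
--     # slide the window: drop v, add u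
--     for v, u in zip(seg, seg[5:]):
--         if v == anti_pattern:
--             anti -= 1
--         elif v == 0:
--             zeros -= 1
--         if u == anti_pattern:
--             anti += 1
--         elif u == 0:
--             zeros += 1
--         best = min(best, 6 if anti else zeros)
--     return best
-- ===== Notes on version B (the rewrite author's own statement) =====
-- stated objective: alternative
-- what changed: Replaces the per-window 5-cell rescan with a single sliding-window pass over the active segment that maintains running counts of anti_pattern cells and empty cells and a running minimum; the segment is at most 9 cells long, so the cost is the same.
import Mathlib
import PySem

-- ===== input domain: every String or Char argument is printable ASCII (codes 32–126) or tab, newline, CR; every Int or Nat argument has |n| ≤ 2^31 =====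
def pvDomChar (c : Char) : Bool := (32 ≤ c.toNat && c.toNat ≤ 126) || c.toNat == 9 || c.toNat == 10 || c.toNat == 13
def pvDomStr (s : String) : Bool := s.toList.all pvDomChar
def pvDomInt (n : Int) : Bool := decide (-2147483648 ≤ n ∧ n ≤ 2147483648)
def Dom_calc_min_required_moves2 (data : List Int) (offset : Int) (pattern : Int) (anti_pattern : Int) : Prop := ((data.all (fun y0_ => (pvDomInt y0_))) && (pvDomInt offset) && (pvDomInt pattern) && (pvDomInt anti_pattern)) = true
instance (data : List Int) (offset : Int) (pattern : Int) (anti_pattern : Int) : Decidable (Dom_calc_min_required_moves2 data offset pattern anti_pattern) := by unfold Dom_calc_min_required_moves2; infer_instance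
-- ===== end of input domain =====

-- B replaces A's per-window 5-cell rescan with a single sliding-window pass keeping
-- running counts of anti_pattern cells and empty cells (objective: alternative algorithm, same cost).

-- ===== PORT A =====
-- inner 'for u in window' loop with its early break
def pvInnerA (anti_pattern : Int) : List Int → Int → Int
  | [], mf => mf
  | u :: rest, mf =>
    if u = anti_pattern then 6
    else if u = 0 then pvInnerA anti_pattern rest (mf + 1)
    else pvInnerA anti_pattern rest mf

def calc_min_required_moves2 (data : List Int) (offset : Int) (pattern : Int) (anti_pattern : Int) : Int :=
  let count_min : Int := 6
  let start_left := max 0 (offset - 4)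
  let end_right := min (offset + 4) ((data.length : Int) - 1)
  let frames := max 0 (end_right - start_left - 3)
  if frames > 0 then
    (PySem.List.pyRange 0 frames 1).foldl (fun cm w =>
      let mf := pvInnerA anti_pattern
        (PySem.List.slice data (some (start_left + w)) (some (start_left + w + 5))) 0
      if mf < cm then mf else cm) count_min
  else count_min

-- ===== PORT B =====
-- body of B's sliding loop: drop outgoing cell v, add incoming cell u, update the minimum
def pvBStep (anti_pattern : Int) (st : Int × Int × Int) (vu : Int × Int) : Int × Int × Int :=
  let a1 := if vu.1 = anti_pattern then st.1 - 1 else st.1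
  let z1 := if vu.1 = anti_pattern then st.2.1 else if vu.1 = 0 then st.2.1 - 1 else st.2.1
  let a2 := if vu.2 = anti_pattern then a1 + 1 else a1
  let z2 := if vu.2 = anti_pattern then z1 else if vu.2 = 0 then z1 + 1 else z1
  (a2, z2, min st.2.2 (if a2 ≠ 0 then 6 else z2))

-- classification of one cell for the initial-window count loop
def pvBClass (anti_pattern : Int) (p : Int × Int) (u : Int) : Int × Int :=
  if u = anti_pattern then (p.1 + 1, p.2) else if u = 0 then (p.1, p.2 + 1) else p

def calc_min_required_moves2_alt (data : List Int) (offset : Int) (pattern : Int) (anti_pattern : Int) : Int :=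
  let lo := max 0 (offset - 4)
  let hi := min (offset + 4) ((data.length : Int) - 1)
  if hi - lo < 4 then 6
  else
    let seg := PySem.List.slice data (some lo) (some (hi + 1))
    let ac := (PySem.List.slice seg none (some 5)).foldl (pvBClass anti_pattern) (0, 0)
    let best : Int := if ac.1 ≠ 0 then 6 else ac.2
    let st := (seg.zip (PySem.List.slice seg (some 5) none)).foldl
      (pvBStep anti_pattern) (ac.1, ac.2, best)
    st.2.2

-- ===== PRECONDITION & SPEC =====
def Spec_calc_min_required_moves2 (data : List Int) (offset : Int) (pattern : Int) (anti_pattern : Int) (out : Int) : Prop := out = calc_min_required_moves2_alt data offset pattern anti_pattern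
instance (data : List Int) (offset : Int) (pattern : Int) (anti_pattern : Int) (out : Int) : Decidable (Spec_calc_min_required_moves2 data offset pattern anti_pattern out) := by unfold Spec_calc_min_required_moves2; infer_instance

-- ===== CLAIM (what is proved, stated in full; the proofs are below) =====
def Claim_equal_calc_min_required_moves2 : Prop := ∀ (data : List Int) (offset : Int) (pattern : Int) (anti_pattern : Int), Dom_calc_min_required_moves2 data offset pattern anti_pattern → Spec_calc_min_required_moves2 data offset pattern anti_pattern (calc_min_required_moves2 data offset pattern anti_pattern)

-- ===== LEMMAS AND PROOFS =====

-- count of anti_pattern cells / of empty (and not anti) cells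
def pvCa (ap : Int) (l : List Int) : Int := (l.countP (fun u => u == ap) : Int)
def pvCz (ap : Int) (l : List Int) : Int := (l.countP (fun u => u != ap && u == 0) : Int)
-- cost of one 5-cell window
def pvCost (ap : Int) (l : List Int) : Int := if pvCa ap l ≠ 0 then 6 else pvCz ap l

-- all full 5-cell windows of a list
def pvWins : List Int → List (List Int)
  | [] => []
  | x :: rest => if 4 ≤ rest.length then (x :: rest).take 5 :: pvWins rest else []

theorem pvCa_cons (ap x : Int) (l : List Int) :
    pvCa ap (x :: l) = (if x = ap then 1 else 0) + pvCa ap l := by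
  simp only [pvCa, List.countP_cons]
  by_cases h1 : x = ap <;> simp [h1] <;> omega

theorem pvCz_cons (ap x : Int) (l : List Int) :
    pvCz ap (x :: l) = (if x = ap then 0 else if x = 0 then 1 else 0) + pvCz ap l := by
  simp only [pvCz, List.countP_cons]
  by_cases h1 : x = ap <;> by_cases h2 : x = 0 <;> simp [h1, h2] <;> omega

theorem pvCa_nil (ap : Int) : pvCa ap [] = 0 := by simp [pvCa]
theorem pvCz_nil (ap : Int) : pvCz ap [] = 0 := by simp [pvCz]

theorem pvCa_append (ap : Int) (l1 l2 : List Int) :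
    pvCa ap (l1 ++ l2) = pvCa ap l1 + pvCa ap l2 := by
  simp [pvCa, List.countP_append]

theorem pvCz_append (ap : Int) (l1 l2 : List Int) :
    pvCz ap (l1 ++ l2) = pvCz ap l1 + pvCz ap l2 := by
  simp [pvCz, List.countP_append]

theorem pvCa_nonneg (ap : Int) (l : List Int) : 0 ≤ pvCa ap l := Int.natCast_nonneg _
theorem pvCz_nonneg (ap : Int) (l : List Int) : 0 ≤ pvCz ap l := Int.natCast_nonneg _

theorem pvCz_le_len (ap : Int) (l : List Int) : pvCz ap l ≤ l.length := by
  simpa [pvCz] using (Int.ofNat_le.mpr (List.countP_le_length (l := l)))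

theorem pvInnerA_eq (ap : Int) : ∀ (l : List Int) (acc : Int),
    pvInnerA ap l acc = if pvCa ap l ≠ 0 then 6 else acc + pvCz ap l := by
  intro l
  induction l with
  | nil => intro acc; simp [pvInnerA, pvCa, pvCz]
  | cons u rest ih =>
    intro acc
    have hcan := pvCa_nonneg ap rest
    simp only [pvInnerA, pvCa_cons, pvCz_cons]
    by_cases h1 : u = ap
    · simp [h1]; omega
    · by_cases h2 : u = 0
      · simp [h1, h2, ih]; try (split_ifs <;> omega)
      · simp [h1, h2, ih]; try (split_ifs <;> omega)

theorem pvWins_nil_of_short (l : List Int) (h : l.length < 5) : pvWins l = [] := by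
  cases l with
  | nil => simp [pvWins]
  | cons x rest => simp only [pvWins]; rw [if_neg]; simp at h; omega

theorem pvWins_cons (x : Int) (rest : List Int) (h : 4 ≤ rest.length) :
    pvWins (x :: rest) = (x :: rest).take 5 :: pvWins rest := by
  simp [pvWins, h]

-- the initial-window count loop computes (pvCa, pvCz)
theorem pvBClass_foldl (ap : Int) : ∀ (l : List Int) (a z : Int),
    l.foldl (pvBClass ap) (a, z) = (a + pvCa ap l, z + pvCz ap l) := by
  intro l
  induction l with
  | nil => intro a z; simp [pvCa, pvCz]
  | cons u rest ih =>
    intro a z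
    simp only [List.foldl_cons, pvBClass, pvCa_cons, pvCz_cons]
    split_ifs <;> simp [ih] <;> ring_nf <;> omega

-- A's window loop equals the min-fold of window costs (stated over drop/take windows)
theorem pvA_fold (ap : Int) : ∀ (l : List Int) (b : Int),
    (List.range (l.length - 4)).foldl (fun cm w =>
      if pvInnerA ap ((l.drop w).take 5) 0 < cm then pvInnerA ap ((l.drop w).take 5) 0 else cm) b
    = (pvWins l).foldl (fun m w => min m (pvCost ap w)) b := by
  intro l
  induction l with
  | nil => intro b; simp [pvWins]
  | cons x rest ih =>
    intro b
    by_cases h : 4 ≤ rest.length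
    · have hlen : (x :: rest).length - 4 = (rest.length - 4) + 1 := by
        simp; omega
      rw [hlen, List.range_succ_eq_map, List.foldl_cons, List.foldl_map,
          pvWins_cons x rest h, List.foldl_cons]
      have hstep : (if pvInnerA ap (((x :: rest).drop 0).take 5) 0 < b
            then pvInnerA ap (((x :: rest).drop 0).take 5) 0 else b)
          = min b (pvCost ap ((x :: rest).take 5)) := by
        simp only [List.drop_zero, pvInnerA_eq, pvCost, Int.zero_add]
        omega
      rw [hstep]
      exact ih _
    · have h5 : (x :: rest).length < 5 := by simp; omega
      rw [pvWins_nil_of_short _ h5]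
      have : (x :: rest).length - 4 = 0 := by simp at h5 ⊢; omega
      rw [this]
      simp
  
-- B's sliding loop equals the min-fold of the costs of the remaining windows
theorem pvB_fold (ap : Int) : ∀ (l : List Int) (b : Int), 5 ≤ l.length →
    ((l.zip (l.drop 5)).foldl (pvBStep ap) (pvCa ap (l.take 5), pvCz ap (l.take 5), b)).2.2
    = (pvWins l.tail).foldl (fun m w => min m (pvCost ap w)) b := by
  intro l
  induction l with
  | nil => intro b h; simp at h
  | cons x rest ih =>
    intro b h
    by_cases h6 : 5 ≤ rest.length
    · match rest, h6 with
      | r1 :: r2 :: r3 :: r4 :: r5 :: t, _ =>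
        have hzip : ((x :: r1 :: r2 :: r3 :: r4 :: r5 :: t).zip
              ((x :: r1 :: r2 :: r3 :: r4 :: r5 :: t).drop 5))
            = (x, r5) :: ((r1 :: r2 :: r3 :: r4 :: r5 :: t).zip
              ((r1 :: r2 :: r3 :: r4 :: r5 :: t).drop 5)) := by
          simp
        rw [hzip, List.foldl_cons]
        have hA : pvCa ap [r1, r2, r3, r4, r5]
            = pvCa ap [r1, r2, r3, r4] + pvCa ap [r5] := by
          have : [r1, r2, r3, r4, r5] = [r1, r2, r3, r4] ++ [r5] := rfl
          rw [this, pvCa_append]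
        have hZ : pvCz ap [r1, r2, r3, r4, r5]
            = pvCz ap [r1, r2, r3, r4] + pvCz ap [r5] := by
          have : [r1, r2, r3, r4, r5] = [r1, r2, r3, r4] ++ [r5] := rfl
          rw [this, pvCz_append]
        have ha1 : (if x = ap then pvCa ap [x, r1, r2, r3, r4] - 1
              else pvCa ap [x, r1, r2, r3, r4]) = pvCa ap [r1, r2, r3, r4] := by
          rw [pvCa_cons]; split_ifs <;> omega
        have ha2 : (if r5 = ap then pvCa ap [r1, r2, r3, r4] + 1
              else pvCa ap [r1, r2, r3, r4]) = pvCa ap [r1, r2, r3, r4, r5] := by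
          simp only [hA, pvCa_cons, pvCa_nil]; split_ifs <;> omega
        have hz1 : (if x = ap then pvCz ap [x, r1, r2, r3, r4]
              else if x = 0 then pvCz ap [x, r1, r2, r3, r4] - 1
              else pvCz ap [x, r1, r2, r3, r4]) = pvCz ap [r1, r2, r3, r4] := by
          rw [pvCz_cons]; split_ifs <;> omega
        have hz2 : (if r5 = ap then pvCz ap [r1, r2, r3, r4]
              else if r5 = 0 then pvCz ap [r1, r2, r3, r4] + 1
              else pvCz ap [r1, r2, r3, r4]) = pvCz ap [r1, r2, r3, r4, r5] := by
          simp only [hZ, pvCz_cons, pvCz_nil]; split_ifs <;> omega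
        have hca : (pvBStep ap (pvCa ap [x, r1, r2, r3, r4], pvCz ap [x, r1, r2, r3, r4], b) (x, r5))
            = (pvCa ap [r1, r2, r3, r4, r5], pvCz ap [r1, r2, r3, r4, r5],
               min b (pvCost ap [r1, r2, r3, r4, r5])) := by
          simp only [pvBStep, pvCost]
          rw [ha1, ha2, hz1, hz2]
        simp only [List.take] at hca ⊢
        rw [hca]
        have := ih (min b (pvCost ap [r1, r2, r3, r4, r5])) (by simp)
        simp only [List.take, List.tail_cons] at this ⊢
        rw [this]
        have h4 : 4 ≤ (r2 :: r3 :: r4 :: r5 :: t).length := by simp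
        rw [pvWins_cons _ _ h4, List.foldl_cons]
        simp
    · -- exactly 5 elements: no slide, tail has no full window
      have hdrop : (x :: rest).drop 5 = [] := by
        apply List.drop_eq_nil_of_le; simp; omega
      rw [hdrop, List.zip_nil_right, List.foldl_nil]
      simp only [List.tail_cons]
      rw [pvWins_nil_of_short rest (by omega), List.foldl_nil]

-- slices of data over the active segment are windows of the segment
theorem pv_slice_window (data : List Int) (lo hi : Int) (k : Nat)
    (h0 : 0 ≤ lo) (hhi : hi + 1 ≤ (data.length : Int)) (hk : (k : Int) < hi - lo - 3) :
    PySem.List.slice data (some (lo + (0 + (k : Int)))) (some (lo + (0 + (k : Int)) + 5))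
    = ((PySem.List.slice data (some lo) (some (hi + 1))).drop k).take 5 := by
  rw [PySem.List.slice_toNat _ (by omega) (by omega), PySem.List.slice_toNat _ h0 (by omega)]
  rw [List.drop_take, List.drop_drop, List.take_take]
  congr 1
  · omega
  · congr 1
    omega

theorem pv_seg_len (data : List Int) (lo hi : Int) (h0 : 0 ≤ lo)
    (hhi : hi + 1 ≤ (data.length : Int)) (hge : 4 ≤ hi - lo) :
    ((PySem.List.slice data (some lo) (some (hi + 1))).length : Int) = hi + 1 - lo := by
  rw [PySem.List.slice_toNat _ h0 (by omega)]
  simp [List.length_take, List.length_drop]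
  omega

-- ===== VERDICT (by name: the statement is the Claim_ definition above) =====
theorem calc_min_required_moves2_spec : Claim_equal_calc_min_required_moves2 := by
  intro data offset pattern ap _
  unfold Spec_calc_min_required_moves2 calc_min_required_moves2 calc_min_required_moves2_alt
  simp only []
  set lo := max 0 (offset - 4) with hlo
  set hi := min (offset + 4) ((data.length : Int) - 1) with hhi
  by_cases hcase : hi - lo < 4
  · rw [if_pos hcase, if_neg (by omega)]
  · have h0 : 0 ≤ lo := le_max_left 0 _
    have hle : hi + 1 ≤ (data.length : Int) := by
      have := min_le_right (offset + 4) ((data.length : Int) - 1)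
      omega
    have hge : 4 ≤ hi - lo := by omega
    rw [if_neg hcase, if_pos (by omega)]
    set seg := PySem.List.slice data (some lo) (some (hi + 1)) with hseg
    have hsl : (seg.length : Int) = hi + 1 - lo := pv_seg_len data lo hi h0 hle hge
    -- A side
    have hmax : max 0 (hi - lo - 3) = hi - lo - 3 := by omega
    rw [hmax, PySem.List.pyRange_one, List.foldl_map]
    have hA : (List.range (hi - lo - 3 - 0).toNat).foldl (fun cm (k : Nat) =>
        if pvInnerA ap
            (PySem.List.slice data (some (lo + (0 + (k : Int)))) (some (lo + (0 + (k : Int)) + 5))) 0 < cm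
        then pvInnerA ap
            (PySem.List.slice data (some (lo + (0 + (k : Int)))) (some (lo + (0 + (k : Int)) + 5))) 0
        else cm) 6
        = (List.range (seg.length - 4)).foldl (fun cm (k : Nat) =>
        if pvInnerA ap ((seg.drop k).take 5) 0 < cm
        then pvInnerA ap ((seg.drop k).take 5) 0 else cm) 6 := by
      have hn : (hi - lo - 3 - 0).toNat = seg.length - 4 := by omega
      rw [hn]
      apply PySem.List.foldl_congr_mem
      intro acc k hkmem
      have hk : k < seg.length - 4 := List.mem_range.mp hkmem
      rw [hseg, pv_slice_window data lo hi k h0 hle (by omega)]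
    rw [hA, pvA_fold ap seg 6]
    -- B side
    rw [PySem.List.slice_to seg (by omega : (0:Int) ≤ 5),
        PySem.List.slice_from seg (by omega : (0:Int) ≤ 5)]
    have h5 : ((5 : Int)).toNat = 5 := rfl
    rw [h5, pvBClass_foldl]
    simp only [zero_add]
    rw [pvB_fold ap seg _ (by omega)]
    -- bridge: first window peeled off
    match hms : seg, (show 5 ≤ seg.length by omega) with
    | s0 :: stail, hlen5 =>
      rw [pvWins_cons s0 stail (by simp at hlen5 ⊢; omega), List.foldl_cons, List.tail_cons]
      congr 1
      have hcz : pvCz ap ((s0 :: stail).take 5) ≤ 5 := by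
        calc pvCz ap ((s0 :: stail).take 5) ≤ ((s0 :: stail).take 5).length :=
              pvCz_le_len ap _
          _ ≤ 5 := by simp
      have hcz0 : 0 ≤ pvCz ap ((s0 :: stail).take 5) := pvCz_nonneg ap _
      simp only [pvCost]
      split_ifs <;> omega
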